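-- pv_equiv track=rewrite | github.com/michaelgrohs/assessment-automation-desirability | Backend/process_mining/pattern_workarounds.py | check_recurrence
-- ===== SOURCE A (Python) =====
-- def check_recurrence(trace_activities, act):
--     """Check if act appears more than once in the trace (recurrence).
--
--     Also detects the special case of direct consecutive repetition.
--
--     Args:
--         trace_activities: ordered list of activity names in the trace
--         act: activity name to check
--
--     Returns:
--         (is_recurrent, is_direct_repeat): both bool
--     """
--     count = trace_activities.count(act)
--     if count <= 1:
--         return False, False
--
--     is_direct = any(
--         trace_activities[i] == act and trace_activities[i + 1] == act
--         for i in range(len(trace_activities) - 1)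
--     )
--     return True, is_direct
-- ===== SOURCE B (Python) =====
-- def check_recurrence(trace_activities, act):
--     """Single pass: count occurrences of act and detect a direct repeat
--     by remembering the previous element."""
--     count = 0
--     prev = None
--     is_direct = False
--     for x in trace_activities:
--         if x == act:
--             count += 1
--             if prev == act:
--                 is_direct = True
--         prev = x
--     return count > 1, is_direct
-- ===== Notes on version B (the rewrite author's own statement) =====
-- stated objective: alternative
-- what changed: B replaces A's two separate scans (list.count plus an index-based any over adjacent pairs) with one stateful pass that maintains an occurrence count and the previous element, setting is_direct when two consecutive elements equal act.
import Mathlib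
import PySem

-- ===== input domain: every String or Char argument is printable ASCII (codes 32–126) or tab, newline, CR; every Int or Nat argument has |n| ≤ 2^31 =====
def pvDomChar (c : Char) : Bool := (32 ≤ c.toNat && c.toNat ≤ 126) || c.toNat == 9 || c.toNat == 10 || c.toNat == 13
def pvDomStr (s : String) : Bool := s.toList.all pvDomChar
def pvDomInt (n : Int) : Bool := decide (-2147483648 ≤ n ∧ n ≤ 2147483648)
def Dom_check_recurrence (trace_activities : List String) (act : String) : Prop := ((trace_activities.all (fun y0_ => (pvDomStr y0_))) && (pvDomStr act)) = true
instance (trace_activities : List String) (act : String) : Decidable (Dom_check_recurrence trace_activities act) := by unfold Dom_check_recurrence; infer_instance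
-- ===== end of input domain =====

-- B replaces A's two separate scans (list.count + an index-based any over adjacent pairs)
-- by one stateful pass tracking the count and the previous element; same O(n) cost, different decomposition.


-- ===== PORT A =====
-- count = trace_activities.count(act); if count <= 1: return False, False
-- is_direct = any(trace_activities[i] == act and trace_activities[i+1] == act for i in range(len(trace_activities)-1))
def check_recurrence (trace_activities : List String) (act : String) : Bool × Bool :=
  let count := PySem.List.count trace_activities act
  if count ≤ 1 then (false, false)
  else
    let is_direct := (PySem.List.pyRange 0 (PySem.List.len trace_activities - 1) 1).any
      (fun i => (PySem.List.pyGetD trace_activities i "" == act) &&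
                (PySem.List.pyGetD trace_activities (i + 1) "" == act))
    (true, is_direct)

-- ===== PORT B =====
-- single pass: state (count, prev, is_direct); on each x, if x == act bump count and
-- set is_direct when prev == act; always update prev.
def check_recurrence_alt (trace_activities : List String) (act : String) : Bool × Bool :=
  let st := trace_activities.foldl
    (fun (s : Int × Option String × Bool) x =>
      if x == act then (s.1 + 1, some x, s.2.2 || (s.2.1 == some act))
      else (s.1, some x, s.2.2))
    ((0 : Int), (none : Option String), false)
  (decide (st.1 > 1), st.2.2)

-- ===== PRECONDITION & SPEC =====
def Spec_check_recurrence (trace_activities : List String) (act : String) (out : Bool × Bool) : Prop := out = check_recurrence_alt trace_activities act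
instance (trace_activities : List String) (act : String) (out : Bool × Bool) : Decidable (Spec_check_recurrence trace_activities act out) := by unfold Spec_check_recurrence; infer_instance

-- ===== CLAIM (what is proved, stated in full; the proofs are below) =====
def Claim_equal_check_recurrence : Prop := ∀ (trace_activities : List String) (act : String), Dom_check_recurrence trace_activities act → Spec_check_recurrence trace_activities act (check_recurrence trace_activities act)

-- ===== LEMMAS AND PROOFS =====

-- 'there is a directly repeated occurrence of act': a recursive characterisation of adjacent pairs
def hasPair (act : String) : List String → Bool
  | x :: y :: t => ((y == act) && (x == act)) || hasPair act (y :: t)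
  | _ => false

-- B's fold, run from state (c, some a, b), sees exactly the adjacent pairs of a :: ts
theorem foldB_eq (act : String) (ts : List String) :
    ∀ (c : Int) (p : Option String) (b : Bool),
      ts.foldl
        (fun (s : Int × Option String × Bool) x =>
          if x == act then (s.1 + 1, some x, s.2.2 || (s.2.1 == some act))
          else (s.1, some x, s.2.2)) (c, p, b)
      = (c + (PySem.List.count ts act : Int),
         (match ts with | [] => p | x :: t => (x :: t).getLast? ),
         b || ((match p with | some a => hasPair act (a :: ts) | none => hasPair act ts))) := by
  induction ts with
  | nil =>
    intro c p b
    simp [PySem.List.count_eq]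
    cases p <;> simp [hasPair]
  | cons x t ih =>
    intro c p b
    simp only [List.foldl_cons]
    by_cases hx : x == act
    · simp only [hx, ih, PySem.List.count_eq, List.count_cons]
      refine Prod.ext ?_ (Prod.ext ?_ ?_)
      · simp; ring
      · cases t <;> simp [List.getLast?_cons]
      · cases p with
        | none =>
          cases t with
          | nil => simp [hasPair]
          | cons y t' => simp [hasPair, hx]
        | some a =>
          cases t with
          | nil => simp [hasPair, hx, Bool.or_comm]
          | cons y t' =>
            simp [hasPair, hx]
            cases b <;> cases (decide (a = act)) <;> cases (decide (y = act)) <;>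
              cases hasPair act (a :: [])  <;> simp
    · simp only [hx, ih, PySem.List.count_eq, List.count_cons]
      refine Prod.ext ?_ (Prod.ext ?_ ?_)
      · simp
      · cases t <;> simp [List.getLast?_cons]
      · cases p with
        | none =>
          cases t with
          | nil => simp [hasPair]
          | cons y t' => simp [hasPair, hx]
        | some a =>
          cases t with
          | nil => simp [hasPair, hx]
          | cons y t' => simp [hasPair, hx]

-- a direct repeat implies at least two occurrences
theorem hasPair_count (act : String) : ∀ ts : List String, hasPair act ts = true → 2 ≤ ts.count act := by
  intro ts h
  induction ts with
  | nil => simp [hasPair] at h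
  | cons x t ih =>
    cases t with
    | nil => simp [hasPair] at h
    | cons y t' =>
      simp only [hasPair, Bool.or_eq_true, Bool.and_eq_true, beq_iff_eq] at h
      rcases h with ⟨hy, hx⟩ | h
      · simp [hx, hy]
      · have := ih (by simpa [hasPair] using h)
        simp [List.count_cons] at this ⊢
        omega

-- hasPair in terms of indices
theorem hasPair_iff (act : String) : ∀ ts : List String,
    hasPair act ts = true ↔ ∃ k : Nat, ts[k]? = some act ∧ ts[k+1]? = some act := by
  intro ts
  induction ts with
  | nil => simp [hasPair]
  | cons x t ih =>
    cases t with
    | nil =>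
      simp [hasPair]
    | cons y t' =>
      simp only [hasPair, Bool.or_eq_true, Bool.and_eq_true, beq_iff_eq]
      constructor
      · rintro (⟨hy, hx⟩ | h)
        · exact ⟨0, by simp [hx, hy]⟩
        · obtain ⟨k, h1, h2⟩ := ih.mp (by simpa [hasPair] using h)
          exact ⟨k + 1, by simpa using h1, by simpa using h2⟩
      · rintro ⟨k, h1, h2⟩
        cases k with
        | zero => left; simp at h1 h2; exact ⟨h2, h1⟩
        | succ k =>
          right
          have : hasPair act (y :: t') = true := ih.mpr ⟨k, by simpa using h1, by simpa using h2⟩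
          simpa [hasPair] using this
-- A's any-over-range equals hasPair
theorem anyA_eq (act : String) (ts : List String) :
    (PySem.List.pyRange 0 (PySem.List.len ts - 1) 1).any
      (fun i => (PySem.List.pyGetD ts i "" == act) &&
                (PySem.List.pyGetD ts (i + 1) "" == act)) = hasPair act ts := by
  rcases hb : (PySem.List.pyRange 0 (PySem.List.len ts - 1) 1).any
      (fun i => (PySem.List.pyGetD ts i "" == act) &&
                (PySem.List.pyGetD ts (i + 1) "" == act)) with _ | _
  · symm
    rw [Bool.eq_false_iff]
    intro hp
    obtain ⟨k, h1, h2⟩ := (hasPair_iff act ts).mp hp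
    have hk1 : k + 1 < ts.length := by
      have := List.getElem?_eq_some_iff.mp h2
      exact this.1
    have hk : k < ts.length := by omega
    have hmem : (k : Int) ∈ PySem.List.pyRange 0 (PySem.List.len ts - 1) 1 := by
      rw [PySem.List.mem_pyRange_one]
      simp [PySem.List.len]
      omega
    have hfalse := List.any_eq_false.mp hb _ hmem
    rw [PySem.List.pyGetD_eq_getElem ts "" (by positivity) (by exact_mod_cast hk)] at hfalse
    rw [show ((k : Int) + 1) = ((k + 1 : Nat) : Int) by push_cast; ring] at hfalse
    rw [PySem.List.pyGetD_eq_getElem ts "" (by positivity) (by exact_mod_cast hk1)] at hfalse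
    simp at hfalse
    have e1 : ts[(k : Int).toNat] = act := by
      have := List.getElem?_eq_some_iff.mp h1
      simpa [Int.toNat_natCast] using this.2
    have e2 : ts[((k + 1 : Nat) : Int).toNat] = act := by
      have := List.getElem?_eq_some_iff.mp h2
      simpa [Int.toNat_natCast] using this.2
    exact absurd e2 (hfalse e1)
  · obtain ⟨i, hmem, hf⟩ := List.any_eq_true.mp hb
    rw [PySem.List.mem_pyRange_one] at hmem
    obtain ⟨h0, hlt⟩ := hmem
    have hlen : i + 1 < (ts.length : Int) := by
      simp [PySem.List.len] at hlt; omega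
    rw [PySem.List.pyGetD_eq_getElem ts "" h0 (by omega)] at hf
    rw [PySem.List.pyGetD_eq_getElem ts "" (by omega) (by omega)] at hf
    simp only [Bool.and_eq_true, beq_iff_eq] at hf
    symm
    rw [hasPair_iff]
    refine ⟨i.toNat, ?_, ?_⟩
    · rw [List.getElem?_eq_some_iff]
      exact ⟨by omega, hf.1⟩
    · rw [List.getElem?_eq_some_iff]
      refine ⟨by omega, ?_⟩
      have h2' : ts[(i + 1).toNat] = act := hf.2
      simpa [show (i + 1).toNat = i.toNat + 1 by omega] using h2'

-- ===== VERDICT (by name: the statement is the Claim_ definition above) =====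
theorem check_recurrence_spec : Claim_equal_check_recurrence := by
  intro ts act _
  unfold Spec_check_recurrence check_recurrence check_recurrence_alt
  rw [foldB_eq]
  simp only [zero_add, Bool.false_or, PySem.List.count_eq]
  by_cases h : List.count act ts ≤ 1
  · rw [if_pos h]
    have hp : hasPair act ts = false := by
      rcases hhp : hasPair act ts with _ | _
      · rfl
      · have := hasPair_count act ts hhp
        simp [List.count] at this h
        omega
    simp [hp]
    omega
  · rw [if_neg h]
    rw [anyA_eq]
    simp
    omega
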